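-- pv_equiv track=rewrite | github.com/kelanax/algorithms-project | efficient_3.py | get_opt_align_column
-- ===== SOURCE A (Python) =====
-- GAP_PENALTY = 30
--
-- MISMATCH_COST = {
--     ('A', 'A'):0,
--     ('A', 'C'): 110,
--     ('A', 'G'): 48,
--     ('A', 'T'): 94,
--     ('C', 'C'):0,
--     ('C', 'A'): 110,
--     ('C', 'G'): 118,
--     ('C', 'T'): 48,
--     ('G', 'G'):0,
--     ('G', 'A'): 48,
--     ('G', 'C'): 118,
--     ('G', 'T'): 110,
--     ('T', 'T'):0,
--     ('T', 'C'): 48,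
--     ('T', 'G'): 110,
--     ('T', 'A'): 94,
--     }
--
-- def get_opt_align_column(str1, str2) :
--      OPT = {}
--      len_str1, len_str2 = len(str1), len(str2)
--      for i in range(len_str2+1):
--           OPT[0, i] = i * GAP_PENALTY
--      curr_col = 1 # start in column 1 of the OPT array
--
--      # ADD BASE CASES FOR IF EITHER STRING EQUALS 0
--
--      # base cases
--      for i in range(1, len_str1 + 1) :
--           for j in range(len_str2 + 1) :
--                if curr_col % 2 == 0 : curr_col, prev_col = 0, 1
--                else : curr_col, prev_col = 1, 0
--
--                if j == 0 : OPT[curr_col,j] = GAP_PENALTY * i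
--                else :
--                     # case 1 = str1 & str2 have a mismatch penalty --> continue with
--                     #                                                  str1[m-1] & str2[n-1]
--                     # case 2 = str1 has a gap that matches position n of str2 --> str1[m-1], str2[n]
--                     # case 3 = str2 has a gap that matches position n of str1 --> str1[m], str2[n-1]
--
--                     case_1 = OPT[prev_col, j-1] + MISMATCH_COST[str1[i-1],str2[j-1]]
--                     case_2 = OPT[prev_col, j] + GAP_PENALTY
--                     case_3 = OPT[curr_col,j-1] + GAP_PENALTY
--                     OPT[curr_col, j] = min(case_1, case_2, case_3)
--           curr_col += 1
--
--      curr_col -= 1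
--      final_col = []
--      for i in range(len_str2 + 1) :
--           final_col.append(OPT[curr_col, i])
--      return final_col
-- ===== SOURCE B (Python) =====
-- GAP_PENALTY = 30
--
-- MISMATCH_COST = {
--     ('A', 'A'):0,
--     ('A', 'C'): 110,
--     ('A', 'G'): 48,
--     ('A', 'T'): 94,
--     ('C', 'C'):0,
--     ('C', 'A'): 110,
--     ('C', 'G'): 118,
--     ('C', 'T'): 48,
--     ('G', 'G'):0,
--     ('G', 'A'): 48,
--     ('G', 'C'): 118,
--     ('G', 'T'): 110,
--     ('T', 'T'):0,
--     ('T', 'C'): 48,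
--     ('T', 'G'): 110,
--     ('T', 'A'): 94,
--     }
--
-- def get_opt_align_column(str1, str2):
--     # Top-down memoized recursion on the alignment cost d(i, j); the memo is
--     # warmed cell by cell so each recursive call is shallow.
--     memo = {}
--
--     def d(i, j):
--         if (i, j) in memo:
--             return memo[i, j]
--         if i == 0:
--             v = j * GAP_PENALTY
--         elif j == 0:
--             v = i * GAP_PENALTY
--         else:
--             v = min(d(i - 1, j - 1) + MISMATCH_COST[str1[i - 1], str2[j - 1]],
--                     d(i - 1, j) + GAP_PENALTY,
--                     d(i, j - 1) + GAP_PENALTY)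
--         memo[i, j] = v
--         return v
--
--     for i in range(len(str1) + 1):
--         for j in range(len(str2) + 1):
--             d(i, j)
--     return [d(len(str1), j) for j in range(len(str2) + 1)]
-- ===== Notes on version B (the rewrite author's own statement) =====
-- stated objective: alternative
-- what changed: A fills the DP table bottom-up with two rolling columns in a dict keyed by column parity; B is a top-down memoized recursion d(i,j) over a plain (i,j)-keyed memo, warmed cell by cell, with the final column read off by calling d(len(str1), j).
import Mathlib
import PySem

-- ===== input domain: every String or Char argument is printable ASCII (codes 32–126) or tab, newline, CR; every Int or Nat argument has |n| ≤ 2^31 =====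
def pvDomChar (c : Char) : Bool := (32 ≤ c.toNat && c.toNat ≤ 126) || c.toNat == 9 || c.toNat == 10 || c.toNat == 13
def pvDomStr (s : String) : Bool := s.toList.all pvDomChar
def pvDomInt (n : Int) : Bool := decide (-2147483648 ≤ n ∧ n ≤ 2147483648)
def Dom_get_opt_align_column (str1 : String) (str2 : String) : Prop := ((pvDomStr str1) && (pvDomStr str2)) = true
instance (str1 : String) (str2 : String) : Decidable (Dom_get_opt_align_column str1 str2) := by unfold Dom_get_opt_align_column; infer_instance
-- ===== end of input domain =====

-- B replaces A's iterative two-rolling-columns DP (a dict keyed by column parity) with a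
-- top-down memoized recursion d(i,j) on the alignment cost, warmed cell by cell (objective:
-- alternative decomposition; equivalence of the RETURN value is what is proved).

-- shared module constants of Source A / Source B
def pvGap : Int := 30

def pvMismatch : PySem.Dict (Char × Char) Int := PySem.Dict.ofList
  [ (('A','A'), 0), (('A','C'), 110), (('A','G'), 48), (('A','T'), 94),
    (('C','C'), 0), (('C','A'), 110), (('C','G'), 118), (('C','T'), 48),
    (('G','G'), 0), (('G','A'), 48), (('G','C'), 118), (('G','T'), 110),
    (('T','T'), 0), (('T','C'), 48), (('T','G'), 110), (('T','A'), 94) ]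

-- ===== PORT A =====
-- literal transliteration of Source A: dict OPT keyed by (column parity, j), two nested loops,
-- parity juggling, final extraction loop.  Dict/list reads are getD with a dummy default:
-- under Pre_ every key read is present (the MISMATCH_COST read is what Pre_ guards).
def get_opt_align_column (str1 : String) (str2 : String) : List Int :=
  let s1 := str1.toList
  let s2 := str2.toList
  let len1 : Int := PySem.Str.len str1
  let len2 : Int := PySem.Str.len str2
  let opt0 : PySem.Dict (Int × Int) Int :=
    (PySem.List.pyRange 0 (len2 + 1) 1).foldl
      (fun d i => d.insert (0, i) (i * pvGap)) PySem.Dict.empty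
  let st :=
    (PySem.List.pyRange 1 (len1 + 1) 1).foldl
      (fun (st : PySem.Dict (Int × Int) Int × Int) i =>
        let inner :=
          (PySem.List.pyRange 0 (len2 + 1) 1).foldl
            (fun (t : PySem.Dict (Int × Int) Int × Int) j =>
              let opt := t.1
              let cols : Int × Int := if PySem.Int.mod t.2 2 == 0 then (0, 1) else (1, 0)
              let curr := cols.1
              let prev := cols.2
              if j == 0 then (opt.insert (curr, j) (pvGap * i), curr)
              else
                let case1 := opt.getD (prev, j - 1) 0 +
                  pvMismatch.getD (PySem.List.pyGetD s1 (i - 1) 'A',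
                                   PySem.List.pyGetD s2 (j - 1) 'A') 0
                let case2 := opt.getD (prev, j) 0 + pvGap
                let case3 := opt.getD (curr, j - 1) 0 + pvGap
                (opt.insert (curr, j) (min (min case1 case2) case3), curr))
            (st.1, st.2)
        (inner.1, inner.2 + 1))
      (opt0, 1)
  let currCol := st.2 - 1
  (PySem.List.pyRange 0 (len2 + 1) 1).map (fun i => st.1.getD (currCol, i) 0)

-- ===== PORT B =====
-- Source B's memoized recursive helper d(i, j); the memo dict is threaded through.
def pvAltD (s1 s2 : List Char) (i j : Nat) (memo : PySem.Dict (Int × Int) Int) :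
    Int × PySem.Dict (Int × Int) Int :=
  match memo.get? ((i : Int), (j : Int)) with
  | some v => (v, memo)
  | none =>
    match i, j with
    | 0, j => ((j : Int) * pvGap, memo.insert (0, (j : Int)) ((j : Int) * pvGap))
    | i + 1, 0 => (((i : Int) + 1) * pvGap, memo.insert ((i : Int) + 1, 0) (((i : Int) + 1) * pvGap))
    | i + 1, j + 1 =>
      let r1 := pvAltD s1 s2 i j memo
      let r2 := pvAltD s1 s2 i (j + 1) r1.2
      let r3 := pvAltD s1 s2 (i + 1) j r2.2
      let v := min (min (r1.1 + pvMismatch.getD (s1.getD i 'A', s2.getD j 'A') 0)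
                        (r2.1 + pvGap)) (r3.1 + pvGap)
      (v, r3.2.insert ((i : Int) + 1, (j : Int) + 1) v)
termination_by (i, j)

def get_opt_align_column_alt (str1 : String) (str2 : String) : List Int :=
  let s1 := str1.toList
  let s2 := str2.toList
  let m := s1.length
  let n := s2.length
  let memo :=
    (List.range (m + 1)).foldl (fun memo i =>
      (List.range (n + 1)).foldl (fun memo j => (pvAltD s1 s2 i j memo).2) memo)
      PySem.Dict.empty
  ((List.range (n + 1)).foldl
      (fun (st : List Int × PySem.Dict (Int × Int) Int) j =>
        let r := pvAltD s1 s2 m j st.2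
        (st.1 ++ [r.1], r.2))
      ([], memo)).1

-- ===== PRECONDITION & SPEC =====
-- Pre_ excludes exactly the inputs where A raises KeyError: both strings nonempty and some
-- character outside {A,C,G,T} (the MISMATCH_COST lookup then misses).
def Pre_get_opt_align_column (str1 : String) (str2 : String) : Prop :=
  str1.toList = [] ∨ str2.toList = [] ∨
    ((str1.toList ++ str2.toList).all
      (fun c => c = 'A' ∨ c = 'C' ∨ c = 'G' ∨ c = 'T') = true)
instance (str1 : String) (str2 : String) : Decidable (Pre_get_opt_align_column str1 str2) := by
  unfold Pre_get_opt_align_column; infer_instance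

def pvWitness_get_opt_align_column : String × String := ("ACGT", "GAT")

def Spec_get_opt_align_column (str1 : String) (str2 : String) (out : List Int) : Prop :=
  out = get_opt_align_column_alt str1 str2
instance (str1 : String) (str2 : String) (out : List Int) :
    Decidable (Spec_get_opt_align_column str1 str2 out) := by
  unfold Spec_get_opt_align_column; infer_instance

-- ===== CLAIM (what is proved, stated in full; the proofs are below) =====
def Claim_equal_get_opt_align_column : Prop := ∀ (str1 : String) (str2 : String), Dom_get_opt_align_column str1 str2 → Pre_get_opt_align_column str1 str2 → Spec_get_opt_align_column str1 str2 (get_opt_align_column str1 str2)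

-- ===== LEMMAS AND PROOFS =====

-- the mathematical alignment-cost table both programs compute
def pvSpecN (s1 s2 : List Char) : Nat → Nat → Int
  | 0, j => (j : Int) * pvGap
  | i + 1, 0 => ((i : Int) + 1) * pvGap
  | i + 1, j + 1 =>
    min (min (pvSpecN s1 s2 i j + pvMismatch.getD (s1.getD i 'A', s2.getD j 'A') 0)
             (pvSpecN s1 s2 i (j + 1) + pvGap))
        (pvSpecN s1 s2 (i + 1) j + pvGap)
termination_by i j => (i, j)

-- B side: coherence of the memo
def pvCoh (s1 s2 : List Char) (memo : PySem.Dict (Int × Int) Int) : Prop :=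
  ∀ (i j : Nat) (v : Int), memo.get? ((i : Int), (j : Int)) = some v → v = pvSpecN s1 s2 i j

theorem pvCoh_empty (s1 s2 : List Char) : pvCoh s1 s2 PySem.Dict.empty := by
  intro i j v h; simp [PySem.Dict.get?_empty] at h

theorem pvCoh_insert (s1 s2 : List Char) (memo : PySem.Dict (Int × Int) Int)
    (h : pvCoh s1 s2 memo) (a b : Nat) (v : Int) (hv : v = pvSpecN s1 s2 a b) :
    pvCoh s1 s2 (memo.insert ((a : Int), (b : Int)) v) := by
  intro i j w hw
  rw [PySem.Dict.get?_insert] at hw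
  split at hw
  · next heq =>
    have h1 : (i : Int) = (a : Int) := congrArg Prod.fst heq
    have h2 : (j : Int) = (b : Int) := congrArg Prod.snd heq
    obtain rfl : i = a := by exact_mod_cast h1
    obtain rfl : j = b := by exact_mod_cast h2
    cases hw; exact hv
  · exact h i j w hw

theorem pvAltD_run (s1 s2 : List Char) : ∀ (N i j : Nat), i + j ≤ N →
    ∀ (memo : PySem.Dict (Int × Int) Int), pvCoh s1 s2 memo →
    (pvAltD s1 s2 i j memo).1 = pvSpecN s1 s2 i j ∧ pvCoh s1 s2 (pvAltD s1 s2 i j memo).2 := by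
  intro N
  induction N with
  | zero =>
    intro i j hij memo h
    obtain ⟨rfl, rfl⟩ : i = 0 ∧ j = 0 := by omega
    rw [pvAltD.eq_def]
    cases hg : memo.get? ((((0 : Nat)) : Int), (((0 : Nat)) : Int)) with
    | some v => exact ⟨h 0 0 v hg, h⟩
    | none =>
      refine ⟨by simp [pvSpecN], ?_⟩
      exact pvCoh_insert s1 s2 memo h 0 0 _ (by simp [pvSpecN])
  | succ N ih =>
    intro i j hij memo h
    rw [pvAltD.eq_def]
    cases hg : memo.get? ((i : Int), (j : Int)) with
    | some v => exact ⟨h i j v hg, h⟩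
    | none =>
      match i, j with
      | 0, j =>
        refine ⟨by simp [pvSpecN], ?_⟩
        have := pvCoh_insert s1 s2 memo h 0 j ((j : Int) * pvGap) (by simp [pvSpecN])
        simpa using this
      | i + 1, 0 =>
        refine ⟨by simp [pvSpecN], ?_⟩
        have := pvCoh_insert s1 s2 memo h (i + 1) 0 (((i : Int) + 1) * pvGap)
          (by simp [pvSpecN])
        simpa [Nat.cast_add] using this
      | i + 1, j + 1 =>
        obtain ⟨e1, c1⟩ := ih i j (by omega) memo h
        obtain ⟨e2, c2⟩ := ih i (j + 1) (by omega) _ c1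
        obtain ⟨e3, c3⟩ := ih (i + 1) j (by omega) _ c2
        constructor
        · simp only [e1, e2, e3]
          rw [pvSpecN]
        · have hv : min (min ((pvAltD s1 s2 i j memo).1 +
              pvMismatch.getD (s1.getD i 'A', s2.getD j 'A') 0)
              ((pvAltD s1 s2 i (j + 1) (pvAltD s1 s2 i j memo).2).1 + pvGap))
              ((pvAltD s1 s2 (i + 1) j (pvAltD s1 s2 i (j + 1) (pvAltD s1 s2 i j memo).2).2).1 + pvGap)
              = pvSpecN s1 s2 (i + 1) (j + 1) := by
            simp only [e1, e2, e3]
            rw [pvSpecN]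
          have := pvCoh_insert s1 s2 _ c3 (i + 1) (j + 1) _ hv
          simpa [Nat.cast_add] using this

theorem pv_warm_coh (s1 s2 : List Char) (i : Nat) (l : List Nat)
    (memo : PySem.Dict (Int × Int) Int) (h : pvCoh s1 s2 memo) :
    pvCoh s1 s2 (l.foldl (fun memo j => (pvAltD s1 s2 i j memo).2) memo) := by
  induction l generalizing memo with
  | nil => exact h
  | cons a t ih => exact ih _ ((pvAltD_run s1 s2 (i + a) i a le_rfl memo h).2)

theorem pv_warm2 (s1 s2 : List Char) (n : Nat) : ∀ (l : List Nat) (memo : PySem.Dict (Int × Int) Int),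
    pvCoh s1 s2 memo →
    pvCoh s1 s2 (l.foldl (fun memo i =>
      (List.range (n + 1)).foldl (fun memo j => (pvAltD s1 s2 i j memo).2) memo) memo) := by
  intro l
  induction l with
  | nil => intro memo h; exact h
  | cons a t ih =>
    intro memo h
    exact ih _ (pv_warm_coh s1 s2 a (List.range (n + 1)) memo h)

theorem pv_final_foldl (s1 s2 : List Char) (m : Nat) :
    ∀ (l : List Nat) (acc : List Int) (memo : PySem.Dict (Int × Int) Int), pvCoh s1 s2 memo →
    (l.foldl (fun (st : List Int × PySem.Dict (Int × Int) Int) j =>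
        (st.1 ++ [(pvAltD s1 s2 m j st.2).1], (pvAltD s1 s2 m j st.2).2)) (acc, memo)).1
      = acc ++ l.map (fun j => pvSpecN s1 s2 m j) := by
  intro l
  induction l with
  | nil => intro acc memo _; simp
  | cons a t ih =>
    intro acc memo h
    obtain ⟨hv, hc⟩ := pvAltD_run s1 s2 (m + a) m a le_rfl memo h
    simp only [List.foldl_cons, List.map_cons]
    rw [ih _ _ hc, hv]
    simp

theorem pv_alt_eq_map (str1 str2 : String) :
    get_opt_align_column_alt str1 str2 =
      (List.range (str2.toList.length + 1)).map
        (fun j => pvSpecN str1.toList str2.toList str1.toList.length j) := by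
  simp only [get_opt_align_column_alt]
  rw [pv_final_foldl str1.toList str2.toList str1.toList.length (List.range (str2.toList.length + 1)) []
    _ (pv_warm2 str1.toList str2.toList str2.toList.length (List.range (str1.toList.length + 1))
        PySem.Dict.empty (pvCoh_empty str1.toList str2.toList))]
  simp

-- A side: a named model of A's zeta-reduced loop body, used only to state the invariants
def pvInnerStep (s1 s2 : List Char) (i : Int) (t : PySem.Dict (Int × Int) Int × Int)
    (j : Int) : PySem.Dict (Int × Int) Int × Int :=
  let cols := if (PySem.Int.mod t.2 2 == 0) = true then ((0 : Int), (1 : Int)) else (1, 0)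
  if (j == 0) = true then (t.1.insert (cols.1, j) (pvGap * i), cols.1)
  else
    (t.1.insert (cols.1, j)
      (min (min (t.1.getD (cols.2, j - 1) 0 +
          pvMismatch.getD (PySem.List.pyGetD s1 (i - 1) 'A', PySem.List.pyGetD s2 (j - 1) 'A') 0)
        (t.1.getD (cols.2, j) 0 + pvGap)) (t.1.getD (cols.1, j - 1) 0 + pvGap)), cols.1)

def pvRowFold (s1 s2 : List Char) (i : Int) (t : PySem.Dict (Int × Int) Int × Int) (k : Nat) :
    PySem.Dict (Int × Int) Int × Int :=
  (List.range k).foldl (fun t (kk : Nat) => pvInnerStep s1 s2 i t (kk : Int)) t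

def pvOuterStep (s1 s2 : List Char) (st : PySem.Dict (Int × Int) Int × Int) (i : Int) :
    PySem.Dict (Int × Int) Int × Int :=
  let inner := (List.range (s2.length + 1)).foldl
    (fun t (k : Nat) => pvInnerStep s1 s2 i t (k : Int)) (st.1, st.2)
  (inner.1, inner.2 + 1)

def pvInit (n : Nat) : PySem.Dict (Int × Int) Int :=
  (List.range (n + 1)).foldl (fun d (k : Nat) => d.insert ((0 : Int), (k : Int)) ((k : Int) * pvGap))
    PySem.Dict.empty

def pvRunA (s1 s2 : List Char) (m : Nat) : PySem.Dict (Int × Int) Int × Int :=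
  (List.range m).foldl (fun st (k : Nat) => pvOuterStep s1 s2 st (1 + (k : Int))) (pvInit s2.length, 1)

def pvColIdx (m : Nat) : Int := if m % 2 == 1 then 1 else 0

theorem pv_toNatA (n : Nat) : ((n : Int) + 1 - 0).toNat = n + 1 := by omega
theorem pv_toNatB (n : Nat) : ((n : Int) + 1 - 1).toNat = n := by omega

theorem pvInit_get : ∀ (n j : Nat), j ≤ n → (pvInit n).get? (0, (j : Int)) = some ((j : Int) * pvGap) := by
  intro n
  induction n with
  | zero =>
    intro j hj
    obtain rfl : j = 0 := by omega
    simp [pvInit, PySem.Dict.get?_insert_self]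
  | succ n ih =>
    intro j hj
    have hstep : pvInit (n + 1) = (pvInit n).insert (0, ((n + 1 : Nat) : Int)) (((n + 1 : Nat) : Int) * pvGap) := by
      simp [pvInit, List.range_succ]
    rw [hstep, PySem.Dict.get?_insert]
    by_cases hje : j = n + 1
    · subst hje; simp
    · have : ((0 : Int), (j : Int)) ≠ ((0 : Int), ((n + 1 : Nat) : Int)) := by
        simp only [ne_eq, Prod.mk.injEq, not_and]
        intro _ hc
        exact hje (by exact_mod_cast hc)
      rw [if_neg this]
      exact ih j (by omega)

theorem pvRowFold_succ (s1 s2 : List Char) (i : Int) (t : PySem.Dict (Int × Int) Int × Int) (k : Nat) :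
    pvRowFold s1 s2 i t (k + 1) = pvInnerStep s1 s2 i (pvRowFold s1 s2 i t k) (k : Int) := by
  simp [pvRowFold, List.range_succ]

theorem pv_row (s1 s2 : List Char) (n i0 : Nat) (c p e : Int)
    (hcp : (c = 0 ∧ p = 1) ∨ (c = 1 ∧ p = 0))
    (he : (if (PySem.Int.mod e 2 == 0) = true then ((0 : Int), (1 : Int)) else (1, 0)) = (c, p))
    (d : PySem.Dict (Int × Int) Int)
    (hprev : ∀ j, j ≤ n → d.get? (p, (j : Int)) = some (pvSpecN s1 s2 i0 j)) :
    ∀ k, k ≤ n →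
      (pvRowFold s1 s2 ((i0 : Int) + 1) (d, e) (k + 1)).2 = c ∧
      (∀ j, j ≤ k → (pvRowFold s1 s2 ((i0 : Int) + 1) (d, e) (k + 1)).1.get? (c, (j : Int)) =
        some (pvSpecN s1 s2 (i0 + 1) j)) ∧
      (∀ j, j ≤ n → (pvRowFold s1 s2 ((i0 : Int) + 1) (d, e) (k + 1)).1.get? (p, (j : Int)) =
        some (pvSpecN s1 s2 i0 j)) := by
  have hpc : p ≠ c := by rcases hcp with ⟨rfl, rfl⟩ | ⟨rfl, rfl⟩ <;> decide
  intro k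
  induction k with
  | zero =>
    intro _
    rw [pvRowFold_succ]
    have h0 : pvRowFold s1 s2 ((i0 : Int) + 1) (d, e) 0 = (d, e) := rfl
    rw [h0]
    unfold pvInnerStep
    simp only [he]
    rw [if_pos (by decide)]
    refine ⟨rfl, ?_, ?_⟩
    · intro j hj
      obtain rfl : j = 0 := by omega
      rw [PySem.Dict.get?_insert_self]
      have : pvSpecN s1 s2 (i0 + 1) 0 = ((i0 : Int) + 1) * pvGap := by
        rw [pvSpecN]
      rw [this]
      ring_nf
    · intro j hj
      rw [PySem.Dict.get?_insert_of_ne _ _ (by simp [Prod.ext_iff, hpc])]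
      exact hprev j hj
  | succ k ih =>
    intro hk
    obtain ⟨ih2, ihc, ihp⟩ := ih (by omega)
    rw [pvRowFold_succ]
    set st := pvRowFold s1 s2 ((i0 : Int) + 1) (d, e) (k + 1) with hst
    unfold pvInnerStep
    have hcols : (if (PySem.Int.mod st.2 2 == 0) = true then ((0 : Int), (1 : Int)) else (1, 0)) = (c, p) := by
      rw [ih2]
      rcases hcp with ⟨rfl, rfl⟩ | ⟨rfl, rfl⟩ <;> decide
    simp only [hcols]
    rw [if_neg (by simp; omega)]
    have hsub1 : ((k + 1 : Nat) : Int) - 1 = (k : Int) := by push_cast; ring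
    have hc1 : st.1.getD (p, ((k + 1 : Nat) : Int) - 1) 0 = pvSpecN s1 s2 i0 k := by
      rw [hsub1]; exact PySem.Dict.getD_of_get?_eq_some _ 0 (ihp k (by omega))
    have hc2 : st.1.getD (p, ((k + 1 : Nat) : Int)) 0 = pvSpecN s1 s2 i0 (k + 1) :=
      PySem.Dict.getD_of_get?_eq_some _ 0 (ihp (k + 1) hk)
    have hc3 : st.1.getD (c, ((k + 1 : Nat) : Int) - 1) 0 = pvSpecN s1 s2 (i0 + 1) k := by
      rw [hsub1]; exact PySem.Dict.getD_of_get?_eq_some _ 0 (ihc k (by omega))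
    have hg1 : PySem.List.pyGetD s1 ((i0 : Int) + 1 - 1) 'A' = s1.getD i0 'A' := by
      have : (i0 : Int) + 1 - 1 = (i0 : Int) := by ring
      rw [this, PySem.List.pyGetD_natCast]
    have hg2 : PySem.List.pyGetD s2 (((k + 1 : Nat) : Int) - 1) 'A' = s2.getD k 'A' := by
      rw [hsub1, PySem.List.pyGetD_natCast]
    have hval : min (min (st.1.getD (p, ((k + 1 : Nat) : Int) - 1) 0 +
        pvMismatch.getD (PySem.List.pyGetD s1 ((i0 : Int) + 1 - 1) 'A',
          PySem.List.pyGetD s2 (((k + 1 : Nat) : Int) - 1) 'A') 0)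
        (st.1.getD (p, ((k + 1 : Nat) : Int)) 0 + pvGap))
        (st.1.getD (c, ((k + 1 : Nat) : Int) - 1) 0 + pvGap) = pvSpecN s1 s2 (i0 + 1) (k + 1) := by
      rw [hc1, hc2, hc3, hg1, hg2, pvSpecN]
    refine ⟨rfl, ?_, ?_⟩
    · intro j hj
      rw [hval, PySem.Dict.get?_insert]
      by_cases hje : j = k + 1
      · subst hje; simp
      · have hne : ((c : Int), (j : Int)) ≠ ((c : Int), ((k + 1 : Nat) : Int)) := by
          simp only [ne_eq, Prod.mk.injEq, not_and]
          intro _ hcst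
          exact hje (by exact_mod_cast hcst)
        rw [if_neg hne]
        exact ihc j (by omega)
    · intro j hj
      rw [hval, PySem.Dict.get?_insert_of_ne _ _ (by simp [Prod.ext_iff, hpc])]
      exact ihp j hj

theorem pvRunA_succ (s1 s2 : List Char) (m : Nat) :
    pvRunA s1 s2 (m + 1) = pvOuterStep s1 s2 (pvRunA s1 s2 m) (1 + (m : Int)) := by
  simp [pvRunA, List.range_succ]

theorem pvColIdx_pair (m : Nat) :
    (pvColIdx (m + 1) = 0 ∧ pvColIdx m = 1) ∨ (pvColIdx (m + 1) = 1 ∧ pvColIdx m = 0) := by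
  rcases Nat.even_or_odd m with hm | hm
  · right
    obtain ⟨r, hr⟩ := hm
    constructor <;> simp [pvColIdx] <;> omega
  · left
    obtain ⟨r, hr⟩ := hm
    constructor <;> simp [pvColIdx] <;> omega

theorem pv_outer (s1 s2 : List Char) : ∀ m : Nat,
    (pvRunA s1 s2 m).2 = pvColIdx m + 1 ∧
    ∀ j, j ≤ s2.length → (pvRunA s1 s2 m).1.get? (pvColIdx m, (j : Int)) =
      some (pvSpecN s1 s2 m j) := by
  intro m
  induction m with
  | zero =>
    refine ⟨rfl, ?_⟩
    intro j hj
    have : pvSpecN s1 s2 0 j = (j : Int) * pvGap := by rw [pvSpecN]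
    rw [this]
    exact pvInit_get s2.length j hj
  | succ m ih =>
    obtain ⟨ih2, ihg⟩ := ih
    rw [pvRunA_succ]
    unfold pvOuterStep
    have harg : (1 : Int) + (m : Int) = (m : Int) + 1 := by ring
    have hrow := pv_row s1 s2 s2.length m (pvColIdx (m + 1)) (pvColIdx m) ((pvRunA s1 s2 m).2)
      (by rcases pvColIdx_pair m with ⟨h1, h2⟩ | ⟨h1, h2⟩ <;> [left; right] <;> exact ⟨h1, h2⟩)
      (by rw [ih2]
          rcases pvColIdx_pair m with ⟨h1, h2⟩ | ⟨h1, h2⟩ <;> rw [h1, h2] <;> decide)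
      (pvRunA s1 s2 m).1 ihg s2.length le_rfl
    obtain ⟨hr2, hrc, _⟩ := hrow
    have hfold : (List.range (s2.length + 1)).foldl
        (fun t (k : Nat) => pvInnerStep s1 s2 (1 + (m : Int)) t (k : Int))
        ((pvRunA s1 s2 m).1, (pvRunA s1 s2 m).2) =
        pvRowFold s1 s2 ((m : Int) + 1) ((pvRunA s1 s2 m).1, (pvRunA s1 s2 m).2) (s2.length + 1) := by
      rw [pvRowFold]
      simp only [harg]
    refine ⟨?_, ?_⟩
    · simp only [hfold, hr2]
    · intro j hj
      simp only [hfold]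
      exact hrc j hj

theorem pv_master (s1 s2 : List Char) :
    List.map (fun k : Nat => (pvRunA s1 s2 s1.length).1.getD ((pvRunA s1 s2 s1.length).2 - 1, (k : Int)) 0)
      (List.range (s2.length + 1)) =
    List.map (fun j => pvSpecN s1 s2 s1.length j) (List.range (s2.length + 1)) := by
  obtain ⟨h2, hg⟩ := pv_outer s1 s2 s1.length
  apply List.map_congr_left
  intro k hk
  have hk' : k ≤ s2.length := by
    have := List.mem_range.mp hk; omega
  have hcol : (pvRunA s1 s2 s1.length).2 - 1 = pvColIdx s1.length := by rw [h2]; ring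
  rw [hcol]
  exact PySem.Dict.getD_of_get?_eq_some _ 0 (hg k hk')

-- A's output in closed form (Pre_ is not needed: the port reads its dict with getD,
-- and every key it reads is present by the loop invariant)
theorem pv_a_eq_map (str1 str2 : String) :
    get_opt_align_column str1 str2 =
      (List.range (str2.toList.length + 1)).map
        (fun j => pvSpecN str1.toList str2.toList str1.toList.length j) := by
  simp only [get_opt_align_column, PySem.Str.len_eq, PySem.List.pyRange_one, List.foldl_map,
    List.map_map, Function.comp_def, zero_add, pv_toNatA, pv_toNatB]
  exact pv_master str1.toList str2.toList

-- ===== VERDICT (by name: the statement is the Claim_ definition above) =====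
theorem get_opt_align_column_spec : Claim_equal_get_opt_align_column := by
  intro str1 str2 _ _
  unfold Spec_get_opt_align_column
  rw [pv_a_eq_map str1 str2, pv_alt_eq_map str1 str2]
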